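-- pv_equiv track=rewrite | github.com/Mesteriis/dashboard | backend/core/bus/client.py | _routing_key_matches
-- ===== SOURCE A (Python) =====
-- def _routing_key_matches(pattern: str, key: str) -> bool:
--     pattern_parts = pattern.split(".")
--     key_parts = key.split(".")
--
--     i = 0
--     j = 0
--     while i < len(pattern_parts) and j < len(key_parts):
--         token = pattern_parts[i]
--         if token == "#":
--             return True
--         if token == "*":
--             i += 1
--             j += 1
--             continue
--         if token != key_parts[j]:
--             return False
--         i += 1
--         j += 1
--
--     if i < len(pattern_parts) and pattern_parts[i] == "#":
--         return True
--     return i == len(pattern_parts) and j == len(key_parts)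
-- ===== SOURCE B (Python) =====
-- def _routing_key_matches(pattern: str, key: str) -> bool:
--     def match_empty(ks):
--         return not ks
--
--     def match_rest(ks):
--         return True
--
--     def match_star(m):
--         return lambda ks: bool(ks) and m(ks[1:])
--
--     def match_lit(t, m):
--         return lambda ks: bool(ks) and ks[0] == t and m(ks[1:])
--
--     matcher = match_empty
--     for token in reversed(pattern.split(".")):
--         if token == "#":
--             matcher = match_rest
--         elif token == "*":
--             matcher = match_star(matcher)
--         else:
--             matcher = match_lit(token, matcher)
--     return matcher(key.split("."))
-- ===== Notes on version B (the rewrite author's own statement) =====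
-- stated objective: alternative
-- what changed: B compiles the pattern tokens right-to-left into a single matcher closure (continuation-passing: '#' snaps to an accept-all continuation, '*' and literals wrap the continuation) and then applies that compiled matcher once to the key tokens, instead of A's interleaved two-index walk over both lists.
import Mathlib
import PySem

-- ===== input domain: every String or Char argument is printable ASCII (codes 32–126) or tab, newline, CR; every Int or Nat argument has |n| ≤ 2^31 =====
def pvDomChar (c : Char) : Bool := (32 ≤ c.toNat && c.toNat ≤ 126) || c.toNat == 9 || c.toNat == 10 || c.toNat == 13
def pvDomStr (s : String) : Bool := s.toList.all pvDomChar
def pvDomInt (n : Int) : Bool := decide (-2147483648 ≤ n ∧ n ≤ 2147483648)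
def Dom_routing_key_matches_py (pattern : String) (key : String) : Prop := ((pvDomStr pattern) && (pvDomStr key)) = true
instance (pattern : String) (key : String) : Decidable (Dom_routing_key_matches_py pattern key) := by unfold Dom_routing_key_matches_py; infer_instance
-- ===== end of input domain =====

-- ===== PORT A =====
-- one honest line: B compiles the pattern right-to-left into a matcher closure and applies
-- it once to the key tokens, instead of A's interleaved two-index walk; objective: alternative.

-- A's while loop: i and j always advance together, so the walk is a lockstep recursion
-- over the two token lists; the fall-through after the loop is the base cases.
def pvLoopA : List String → List String → Bool
  | t :: ps, k :: ks =>
      if t = "#" then true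
      else if t = "*" then pvLoopA ps ks
      else if t ≠ k then false
      else pvLoopA ps ks
  | t :: _, [] => t = "#"          -- i < len(pattern): True iff pattern_parts[i] == '#'
  | [], ks => ks.isEmpty           -- i == len(pattern): True iff j == len(key_parts)

def routing_key_matches_py (pattern : String) (key : String) : Bool :=
  pvLoopA ((PySem.Str.split? pattern ".").getD []) ((PySem.Str.split? key ".").getD [])

-- ===== PORT B =====
-- Source B's three closure builders: accept-all for '#', consume-one for '*', compare-then-consume
-- for a literal token; the for-loop over reversed(pattern_parts) is the foldl over .reverse.
def pvStep (t : String) (m : List String → Bool) : List String → Bool :=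
  if t = "#" then fun _ => true
  else if t = "*" then fun ks => !ks.isEmpty && m (ks.drop 1)
  else fun ks =>
    match ks with
    | [] => false
    | k :: ks' => (k = t) && m ks'

def routing_key_matches_py_alt (pattern : String) (key : String) : Bool :=
  let matcher :=
    (((PySem.Str.split? pattern ".").getD []).reverse).foldl
      (fun m t => pvStep t m) (fun ks => ks.isEmpty)
  matcher ((PySem.Str.split? key ".").getD [])

-- ===== PRECONDITION & SPEC =====
def Spec_routing_key_matches_py (pattern : String) (key : String) (out : Bool) : Prop := out = routing_key_matches_py_alt pattern key
instance (pattern : String) (key : String) (out : Bool) : Decidable (Spec_routing_key_matches_py pattern key out) := by unfold Spec_routing_key_matches_py; infer_instance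

-- ===== CLAIM =====
def Claim_equal_routing_key_matches_py : Prop := ∀ (pattern : String) (key : String), Dom_routing_key_matches_py pattern key → Spec_routing_key_matches_py pattern key (routing_key_matches_py pattern key)

-- ===== LEMMAS AND PROOFS =====

theorem pvLoop_eq_foldr : ∀ (ps ks : List String),
    pvLoopA ps ks = (ps.foldr pvStep (fun ks => ks.isEmpty)) ks := by
  intro ps
  induction ps with
  | nil => intro ks; rfl
  | cons t ps ih =>
      intro ks
      simp only [List.foldr_cons]
      by_cases ht : t = "#"
      · cases ks <;> simp [pvLoopA, pvStep, ht]
      · by_cases hs : t = "*"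
        · cases ks <;> simp [pvLoopA, pvStep, hs, ih]
        · cases ks with
          | nil => simp [pvLoopA, pvStep, ht, hs]
          | cons k ks' =>
              by_cases hk : t = k
              · subst hk; simp [pvLoopA, pvStep, ht, hs, ih]
              · simp [pvLoopA, pvStep, ht, hs, hk, Ne.symm hk]

-- ===== VERDICT =====
theorem routing_key_matches_py_spec : Claim_equal_routing_key_matches_py := by
  intro pattern key _
  unfold Spec_routing_key_matches_py routing_key_matches_py routing_key_matches_py_alt
  rw [List.foldl_reverse]
  exact pvLoop_eq_foldr _ _
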